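-- pv_equiv track=rewrite | github.com/aitsvet/agentic-chats-reporter | main.py | filter_parse_usage_output
-- ===== SOURCE A (Python) =====
-- def filter_parse_usage_output(output):
--     lines = output.split('\n')
--     result = []
--     in_stats = False
--     for line in lines:
--         if '| Metric | Requests |' in line:
--             in_stats = True
--         if in_stats:
--             if line.strip().startswith('|'):
--                 result.append(line)
--             elif line.strip() == '':
--                 if result:
--                     result.append(line)
--                 in_stats = False
--     return '\n'.join(result) + '\n' if result else ''
-- ===== SOURCE B (Python) =====
-- def filter_parse_usage_output(output):
--     HEADER = '| Metric | Requests |'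
--     lines = output.split('\n')
--     # Stage 1: group the lines into blank-separated paragraphs, each paired with
--     # its terminating blank line (None for the final, unterminated paragraph).
--     paras = []
--     cur = []
--     for line in lines:
--         if line.strip() == '':
--             paras.append((cur, line))
--             cur = []
--         else:
--             cur.append(line)
--     paras.append((cur, None))
--     # Stage 2: a paragraph contributes iff it contains the header; from the first
--     # header line onward keep the table rows, then keep the terminating blank
--     # line if anything has been collected so far.
--     result = []
--     for body, blank in paras:
--         tail = None
--         for k, l in enumerate(body):
--             if HEADER in l:
--                 tail = body[k:]
--                 break
--         if tail is None:
--             continue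
--         result.extend(l for l in tail if l.strip().startswith('|'))
--         if blank is not None and result:
--             result.append(blank)
--     return '\n'.join(result) + '\n' if result else ''
-- ===== Notes on version B (the rewrite author's own statement) =====
-- stated objective: alternative
-- what changed: A's single flat loop with an in_stats flag is replaced by a staged computation: first group the lines into blank-terminated paragraphs, then per paragraph locate the first header line and harvest the pipe-prefixed table rows from there on, appending each paragraph's terminating blank when the shared result is non-empty.
import Mathlib
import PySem

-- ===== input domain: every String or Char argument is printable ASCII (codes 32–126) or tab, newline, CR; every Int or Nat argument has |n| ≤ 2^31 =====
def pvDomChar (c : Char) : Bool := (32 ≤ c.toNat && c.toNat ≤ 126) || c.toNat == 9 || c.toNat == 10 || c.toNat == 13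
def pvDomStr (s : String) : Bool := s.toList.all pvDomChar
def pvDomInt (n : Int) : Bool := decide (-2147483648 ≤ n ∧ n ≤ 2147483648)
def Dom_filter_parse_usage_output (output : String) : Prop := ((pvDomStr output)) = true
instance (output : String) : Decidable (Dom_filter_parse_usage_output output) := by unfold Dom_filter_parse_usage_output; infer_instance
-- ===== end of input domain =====

-- B replaces A's flat flag-driven loop by a staged computation: group lines into blank-terminated paragraphs, then harvest table rows per paragraph from its first header line; objective: alternative decomposition, same cost.


-- shared per-line tests ('| Metric | Requests |' in line, line.strip().startswith('|'), line.strip() == '')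
def pvIsHeader (l : String) : Bool := PySem.Str.isIn "| Metric | Requests |" l
def pvStartsBar (l : String) : Bool := PySem.Str.startswith (PySem.Str.strip l) "|"
def pvIsBlank (l : String) : Bool := PySem.Str.strip l == ""

-- ===== PORT A =====
-- A's loop body: per line, maybe set the flag, then (flag set) append / blank-handle / skip.
def pvAStep (st : List String × Bool) (line : String) : List String × Bool :=
  let st := if pvIsHeader line then (st.1, true) else st
  if st.2 then
    if pvStartsBar line then (st.1 ++ [line], st.2)
    else if pvIsBlank line then
      ((if st.1 ≠ [] then st.1 ++ [line] else st.1), false)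
    else st
  else st

def filter_parse_usage_output (output : String) : String :=
  let lines := (PySem.Str.split? output "\n").getD []   -- sep "\n" ≠ "", so split? is some
  let result := (lines.foldl pvAStep ([], false)).1
  if result ≠ [] then PySem.Str.join "\n" result ++ "\n" else ""

-- ===== PORT B =====
-- Stage 1 of Source B: group the lines into paragraphs, each paired with its
-- terminating blank line (none for the final, unterminated paragraph).
def pvParaStep (st : List (List String × Option String) × List String) (line : String) :
    List (List String × Option String) × List String :=
  if pvIsBlank line then (st.1 ++ [(st.2, some line)], []) else (st.1, st.2 ++ [line])

-- Source B's inner enumerate-and-slice search: the suffix of the body from its first header line.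
def pvHeaderTail : List String → Option (List String)
  | [] => none
  | l :: rest => if pvIsHeader l then some (l :: rest) else pvHeaderTail rest

-- Stage 2 of Source B: one paragraph's contribution to the shared result list.
def pvBlockStep (res : List String) (p : List String × Option String) : List String :=
  match pvHeaderTail p.1 with
  | none => res
  | some tail =>
    let res2 := res ++ tail.filter pvStartsBar
    match p.2 with
    | some blank => if res2 ≠ [] then res2 ++ [blank] else res2
    | none => res2

def filter_parse_usage_output_alt (output : String) : String :=
  let lines := (PySem.Str.split? output "\n").getD []   -- sep "\n" ≠ "", so split? is some
  let st := lines.foldl pvParaStep ([], [])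
  let result := (st.1 ++ [(st.2, none)]).foldl pvBlockStep []
  if result ≠ [] then PySem.Str.join "\n" result ++ "\n" else ""

-- ===== PRECONDITION & SPEC =====
def Spec_filter_parse_usage_output (output : String) (out : String) : Prop := out = filter_parse_usage_output_alt output
instance (output : String) (out : String) : Decidable (Spec_filter_parse_usage_output output out) := by unfold Spec_filter_parse_usage_output; infer_instance

-- ===== CLAIM (what is proved, stated in full; the proofs are below) =====
def Claim_equal_filter_parse_usage_output : Prop := ∀ (output : String), Dom_filter_parse_usage_output output → Spec_filter_parse_usage_output output (filter_parse_usage_output output)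

-- ===== LEMMAS AND PROOFS =====
-- A blank line (strip == '') consists of whitespace only …
theorem pv_strip_nil_all {cs : List Char} (h : PySem.Chars.strip cs = []) :
    ∀ c ∈ cs, PySem.Chars.isspace c = true := by
  intro c hc
  have h1 : List.dropWhile PySem.Chars.isspace
      (List.dropWhile PySem.Chars.isspace cs).reverse = [] := by
    simpa [PySem.Chars.strip, PySem.Chars.rstrip, PySem.Chars.lstrip] using h
  have hdrop : ∀ a ∈ List.dropWhile PySem.Chars.isspace cs, PySem.Chars.isspace a = true := by
    intro a ha
    exact (List.dropWhile_eq_nil_iff.mp h1) a (List.mem_reverse.mpr ha)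
  have hsplit := List.takeWhile_append_dropWhile (p := PySem.Chars.isspace) (l := cs)
  rw [← hsplit] at hc
  rcases List.mem_append.mp hc with h' | h'
  · exact List.mem_takeWhile_imp h'
  · exact hdrop c h'

-- … so it cannot contain the header substring, and it does not start with '|'.
theorem pv_blank_not_header {l : String} (hb : pvIsBlank l = true) : pvIsHeader l = false := by
  have hstrip : PySem.Chars.strip l.toList = [] := by
    have : PySem.Str.strip l = "" := by simpa [pvIsBlank] using hb
    simpa using congrArg String.toList this
  by_contra h
  have hh : pvIsHeader l = true := by revert h; cases pvIsHeader l <;> simp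
  have hinf : ("| Metric | Requests |".toList) <:+: l.toList :=
    (PySem.Str.isIn_iff_infix _ _).mp hh
  have hmem : '|' ∈ l.toList := hinf.sublist.subset (by decide)
  have := pv_strip_nil_all hstrip '|' hmem
  simp [PySem.Chars.isspace] at this

theorem pv_blank_not_bar {l : String} (hb : pvIsBlank l = true) : pvStartsBar l = false := by
  have : PySem.Str.strip l = "" := by simpa [pvIsBlank] using hb
  simp [pvStartsBar, this]
  decide

-- Stage-1 fold: a prefix of already-completed paragraphs passes through unchanged.
theorem pv_para_prefix (lines : List String) : ∀ (ps : List (List String × Option String)) (c : List String),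
    lines.foldl pvParaStep (ps, c)
      = (ps ++ (lines.foldl pvParaStep ([], c)).1, (lines.foldl pvParaStep ([], c)).2) := by
  induction lines with
  | nil => intro ps c; simp
  | cons l rest ih =>
    intro ps c
    by_cases hb : pvIsBlank l = true
    · simp only [List.foldl_cons, pvParaStep, hb, if_pos]
      rw [ih (ps ++ [(c, some l)]) [], ih ([] ++ [(c, some l)]) []]
      simp
    · simp only [List.foldl_cons, pvParaStep, hb, if_neg, Bool.not_eq_true]
      rw [ih ps (c ++ [l])]

theorem pv_headerTail_append_none {cur : List String} {l : String}
    (h : pvHeaderTail cur = none) :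
    pvHeaderTail (cur ++ [l]) = if pvIsHeader l then some [l] else none := by
  induction cur with
  | nil => simp [pvHeaderTail]
  | cons x xs ih =>
    by_cases hx : pvIsHeader x = true
    · simp [pvHeaderTail, hx] at h
    · simp only [pvHeaderTail, hx, if_neg, Bool.not_eq_true] at h ⊢
      simp [pvHeaderTail, hx]
      exact ih h

theorem pv_headerTail_append_some {cur t : List String} {l : String}
    (h : pvHeaderTail cur = some t) :
    pvHeaderTail (cur ++ [l]) = some (t ++ [l]) := by
  induction cur generalizing t with
  | nil => simp [pvHeaderTail] at h
  | cons x xs ih =>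
    by_cases hx : pvIsHeader x = true
    · simp [pvHeaderTail, hx] at h ⊢
      simp [← h]
    · simp only [pvHeaderTail, hx, if_neg, Bool.not_eq_true] at h ⊢
      simp [pvHeaderTail, hx]
      exact ih h

-- A's state corresponding to B's pending paragraph 'cur' and accumulated result 'res'.
def pvInit (cur res : List String) : List String × Bool :=
  match pvHeaderTail cur with
  | none => (res, false)
  | some t => (res ++ t.filter pvStartsBar, true)

theorem pv_init_step (cur res : List String) (l : String) (hnb : pvIsBlank l = false) :
    pvInit (cur ++ [l]) res = pvAStep (pvInit cur res) l := by
  cases hht : pvHeaderTail cur with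
  | none =>
    by_cases hh : pvIsHeader l = true <;>
      simp [pvInit, pvAStep, hht, pv_headerTail_append_none hht, hh, hnb,
        List.filter]
    by_cases hs : pvStartsBar l = true <;> simp [hs]
  | some t =>
    by_cases hh : pvIsHeader l = true <;>
      by_cases hs : pvStartsBar l = true <;>
      simp [pvInit, pvAStep, hht, pv_headerTail_append_some hht, hh, hs, hnb,
        List.filter_append, List.filter]

theorem pv_blank_step (cur res : List String) (l : String)
    (hb : pvIsBlank l = true) (hh : pvIsHeader l = false) (hs : pvStartsBar l = false) :
    pvAStep (pvInit cur res) l = (pvBlockStep res (cur, some l), false) := by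
  cases hht : pvHeaderTail cur <;>
    simp [pvInit, pvAStep, pvBlockStep, hht, hh, hs, hb]

theorem pv_main (lines : List String) : ∀ cur res : List String,
    ((lines.foldl pvParaStep ([], cur)).1
        ++ [((lines.foldl pvParaStep ([], cur)).2, none)]).foldl pvBlockStep res
      = (lines.foldl pvAStep (pvInit cur res)).1 := by
  induction lines with
  | nil =>
    intro cur res
    cases hht : pvHeaderTail cur <;> simp [pvBlockStep, pvInit, hht]
  | cons l rest ih =>
    intro cur res
    by_cases hb : pvIsBlank l = true
    · have hh := pv_blank_not_header hb
      have hs := pv_blank_not_bar hb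
      simp only [List.foldl_cons, pvParaStep, hb, if_pos]
      rw [pv_para_prefix rest ([] ++ [(cur, some l)]) []]
      simp only [List.nil_append, List.cons_append, List.foldl_cons]
      rw [ih [] (pvBlockStep res (cur, some l)), pv_blank_step cur res l hb hh hs]
      simp [pvInit, pvHeaderTail]
    · have hnb : pvIsBlank l = false := by revert hb; cases pvIsBlank l <;> simp
      simp only [List.foldl_cons, pvParaStep, hnb, Bool.false_eq_true, if_false]
      rw [ih (cur ++ [l]) res, pv_init_step cur res l hnb]

-- ===== VERDICT (by name: the statement is the Claim_ definition above) =====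
theorem filter_parse_usage_output_spec : Claim_equal_filter_parse_usage_output := by
  intro output _
  unfold Spec_filter_parse_usage_output filter_parse_usage_output filter_parse_usage_output_alt
  exact congrArg (fun r => if r ≠ [] then PySem.Str.join "\n" r ++ "\n" else "")
    (pv_main ((PySem.Str.split? output "\n").getD []) [] []).symm
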